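-- pv_equiv track=rewrite | github.com/kubaxent/IDScanner | processText.py | found_city
-- ===== SOURCE A (Python) =====
-- def found_city(text):
--     if len(text) <= 2:
--         return ""
--     number_found = False
--     city_result = ""
--     for c in text:
--         if number_found:
--             city_result += c
--         else:
--             if c.isdigit():
--                 city_result += c
--                 number_found = True
--     return city_result
-- ===== SOURCE B (Python) =====
-- def found_city(text):
--     if len(text) <= 2:
--         return ""
--     for i, c in enumerate(text):
--         if c.isdigit():
--             return text[i:]
--     return ""
-- ===== Notes on version B (the rewrite author's own statement) =====
-- stated objective: simpler
-- what changed: B locates the index of the first digit and returns one slice text[i:], replacing A's boolean-flag loop that concatenates the result character by character.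
import Mathlib
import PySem

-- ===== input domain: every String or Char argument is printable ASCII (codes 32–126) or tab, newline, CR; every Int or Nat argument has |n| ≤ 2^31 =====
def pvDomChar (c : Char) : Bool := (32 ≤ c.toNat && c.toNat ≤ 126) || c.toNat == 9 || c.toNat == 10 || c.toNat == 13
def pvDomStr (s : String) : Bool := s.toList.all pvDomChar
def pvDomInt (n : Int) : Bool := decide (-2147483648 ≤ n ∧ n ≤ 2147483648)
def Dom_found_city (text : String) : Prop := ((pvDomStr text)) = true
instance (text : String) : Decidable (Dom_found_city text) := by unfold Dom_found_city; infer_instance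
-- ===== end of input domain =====

-- B finds the index of the first digit and returns one slice of the text, instead of A's
-- boolean-flag loop that concatenates the result character by character (objective: simpler).


-- ===== PORT A =====
-- the for-loop of A over the characters, carrying (number_found, city_result)
def foundCityLoopA : List Char → Bool → List Char → List Char
  | [], _, acc => acc
  | c :: cs, numberFound, acc =>
    if numberFound then
      foundCityLoopA cs numberFound (acc ++ [c])
    else if PySem.Chars.isdigit c then
      foundCityLoopA cs true (acc ++ [c])
    else
      foundCityLoopA cs numberFound acc

def found_city (text : String) : String :=
  if PySem.Str.len text ≤ 2 then ""
  else String.ofList (foundCityLoopA text.toList false [])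

-- ===== PORT B =====
def found_city_alt (text : String) : String :=
  if PySem.Str.len text ≤ 2 then ""
  else
    match text.toList.findIdx? (fun c => PySem.Chars.isdigit c) with
    | some i => String.ofList (text.toList.drop i)   -- text[i:]
    | none => ""

-- ===== PRECONDITION & SPEC =====
def Spec_found_city (text : String) (out : String) : Prop := out = found_city_alt text
instance (text : String) (out : String) : Decidable (Spec_found_city text out) := by unfold Spec_found_city; infer_instance

-- ===== CLAIM (what is proved, stated in full; the proofs are below) =====
def Claim_equal_found_city : Prop := ∀ (text : String), Dom_found_city text → Spec_found_city text (found_city text)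

-- ===== LEMMAS AND PROOFS =====
theorem foundCityLoopA_true (cs : List Char) (acc : List Char) :
    foundCityLoopA cs true acc = acc ++ cs := by
  induction cs generalizing acc with
  | nil => simp [foundCityLoopA]
  | cons c cs ih => simp [foundCityLoopA, ih]

theorem foundCityLoopA_false (cs : List Char) (acc : List Char) :
    foundCityLoopA cs false acc =
      acc ++ (match cs.findIdx? (fun c => PySem.Chars.isdigit c) with
              | some i => cs.drop i
              | none => []) := by
  induction cs generalizing acc with
  | nil => simp [foundCityLoopA]
  | cons c cs ih =>
    by_cases hd : PySem.Chars.isdigit c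
    · simp [foundCityLoopA, hd, foundCityLoopA_true, List.findIdx?_cons]
    · simp [foundCityLoopA, hd, ih, List.findIdx?_cons]
      cases cs.findIdx? (fun c => PySem.Chars.isdigit c) <;> simp

-- ===== VERDICT (by name: the statement is the Claim_ definition above) =====
theorem found_city_spec : Claim_equal_found_city := by
  intro text _
  unfold Spec_found_city found_city found_city_alt
  split
  · rfl
  · rw [foundCityLoopA_false]
    cases text.toList.findIdx? (fun c => PySem.Chars.isdigit c) <;> simp
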